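-- pv_equiv track=rewrite | github.com/Panchitoz1/luanspaceship | LuanSpaceShip/DrawSpaceship.py | drawMidTopSpaceship
-- ===== SOURCE A (Python) =====
-- def drawMidTopSpaceship(length):
--     midtop_spaceship = ''
--
--     for j in range(0, length):
--
--         midtop_spaceship += ' ' * length
--         midtop_spaceship += '|'
--
--         if j == length-1:
--             midtop_spaceship += '_' * (2*length - 1)
--         else:
--             midtop_spaceship += ' ' * (2*length - 1)
--
--         midtop_spaceship += '|\n'
--
--     return midtop_spaceship
-- ===== SOURCE B (Python) =====
-- def drawMidTopSpaceship(length):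
--     if length < 1:
--         return ''
--     mid = ' ' * length + '|' + ' ' * (2 * length - 1) + '|\n'
--     bottom = ' ' * length + '|' + '_' * (2 * length - 1) + '|\n'
--     return mid * (length - 1) + bottom
-- ===== Notes on version B (the rewrite author's own statement) =====
-- stated objective: simpler
-- what changed: Replaces the per-row loop with its j==length-1 conditional by building the two distinct row strings once and returning mid*(length-1)+bottom via closed-form string repetition.
import Mathlib
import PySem

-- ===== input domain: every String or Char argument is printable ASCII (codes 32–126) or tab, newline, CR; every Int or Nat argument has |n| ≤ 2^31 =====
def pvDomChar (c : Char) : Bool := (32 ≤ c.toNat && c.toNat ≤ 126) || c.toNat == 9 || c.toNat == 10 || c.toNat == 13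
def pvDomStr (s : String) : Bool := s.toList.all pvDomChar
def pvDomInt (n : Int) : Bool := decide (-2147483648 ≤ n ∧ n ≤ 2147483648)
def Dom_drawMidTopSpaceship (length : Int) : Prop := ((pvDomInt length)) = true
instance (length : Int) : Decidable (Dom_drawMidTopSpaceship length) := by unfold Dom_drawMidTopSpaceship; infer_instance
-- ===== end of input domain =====

-- B replaces A's per-row loop and j==length-1 branch by building the two row strings once
-- and repeating the middle row (length-1) times before the single bottom row (objective: simpler).

-- ===== PORT A =====
-- A's loop body, accumulating on List Char (strings ported on the list side, wrapped once at the end)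
def drawMidTopSpaceshipChars (length : Int) : List Char :=
  (PySem.List.pyRange 0 length 1).foldl (fun acc j =>
    ((acc ++ PySem.List.pyRepeat [' '] length) ++ ['|'])
      ++ (if j = length - 1 then PySem.List.pyRepeat ['_'] (2 * length - 1)
          else PySem.List.pyRepeat [' '] (2 * length - 1))
      ++ ['|', '\n']) []

def drawMidTopSpaceship (length : Int) : String :=
  String.ofList (drawMidTopSpaceshipChars length)

-- ===== PORT B =====
def pvMidRow (length : Int) : List Char :=
  PySem.List.pyRepeat [' '] length ++ ['|'] ++ PySem.List.pyRepeat [' '] (2 * length - 1) ++ ['|', '\n']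

def pvBottomRow (length : Int) : List Char :=
  PySem.List.pyRepeat [' '] length ++ ['|'] ++ PySem.List.pyRepeat ['_'] (2 * length - 1) ++ ['|', '\n']

def drawMidTopSpaceship_alt (length : Int) : String :=
  if length < 1 then ""
  else String.ofList (PySem.List.pyRepeat (pvMidRow length) (length - 1) ++ pvBottomRow length)

-- ===== PRECONDITION & SPEC =====
def Spec_drawMidTopSpaceship (length : Int) (out : String) : Prop := out = drawMidTopSpaceship_alt length
instance (length : Int) (out : String) : Decidable (Spec_drawMidTopSpaceship length out) := by unfold Spec_drawMidTopSpaceship; infer_instance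

-- ===== CLAIM (what is proved, stated in full; the proofs are below) =====
def Claim_equal_drawMidTopSpaceship : Prop := ∀ (length : Int), Dom_drawMidTopSpaceship length → Spec_drawMidTopSpaceship length (drawMidTopSpaceship length)

-- ===== LEMMAS AND PROOFS =====

theorem pyRepeat_succ_nat {α : Type} (xs : List α) (m : Nat) :
    PySem.List.pyRepeat xs ((m : Int) + 1) = PySem.List.pyRepeat xs (m : Int) ++ xs := by
  simp [PySem.List.pyRepeat, List.replicate_succ']

-- A's loop over the first m iterations (all with j < length - 1) appends m middle rows
theorem fold_prefix (length : Int) (m : Nat) (hm : (m : Int) ≤ length - 1) (acc : List Char) :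
    (PySem.List.pyRange 0 (m : Int) 1).foldl (fun acc j =>
      ((acc ++ PySem.List.pyRepeat [' '] length) ++ ['|'])
        ++ (if j = length - 1 then PySem.List.pyRepeat ['_'] (2 * length - 1)
            else PySem.List.pyRepeat [' '] (2 * length - 1))
        ++ ['|', '\n']) acc
    = acc ++ PySem.List.pyRepeat (pvMidRow length) (m : Int) := by
  induction m generalizing acc with
  | zero => simp [PySem.List.pyRange_one_eq_nil, PySem.List.pyRepeat]
  | succ k ih =>
    have hk : (k : Int) ≤ length - 1 := by push_cast at hm ⊢; omega
    have hsplit : PySem.List.pyRange 0 ((k : Int) + 1) 1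
        = PySem.List.pyRange 0 (k : Int) 1 ++ [(k : Int)] := by
      exact PySem.List.pyRange_one_succ_right (by positivity)
    have hne : (k : Int) ≠ length - 1 := by push_cast at hm; omega
    push_cast
    rw [hsplit, List.foldl_append, ih hk]
    simp only [List.foldl_cons, List.foldl_nil, if_neg hne]
    rw [pyRepeat_succ_nat]
    simp [pvMidRow, List.append_assoc]

theorem drawMidTopSpaceship_spec_aux (length : Int) :
    drawMidTopSpaceship length = drawMidTopSpaceship_alt length := by
  unfold drawMidTopSpaceship drawMidTopSpaceship_alt drawMidTopSpaceshipChars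
  by_cases h : length < 1
  · rw [if_pos h, PySem.List.pyRange_one_eq_nil (by omega)]
    rfl
  · rw [if_neg h]
    have h1 : (1 : Int) ≤ length := by omega
    have hsplit : PySem.List.pyRange 0 length 1
        = PySem.List.pyRange 0 (length - 1) 1 ++ [length - 1] := by
      have := PySem.List.pyRange_one_succ_right (a := 0) (b := length - 1) (by omega)
      simpa using this
    rw [hsplit, List.foldl_append]
    have hm : ((length - 1).toNat : Int) = length - 1 := by omega
    have := fold_prefix length (length - 1).toNat (by omega) []
    rw [hm] at this
    rw [this]
    simp only [List.foldl_cons, List.foldl_nil]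
    simp [pvBottomRow, List.append_assoc]

-- ===== VERDICT (by name: the statement is the Claim_ definition above) =====
theorem drawMidTopSpaceship_spec : Claim_equal_drawMidTopSpaceship := by
  intro length _
  exact drawMidTopSpaceship_spec_aux length
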